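-- pv_equiv track=rewrite | github.com/fasitahir/autogit_remote | tools/documentation_tool.py | _prioritize_files_for_documentation
-- ===== SOURCE A (Python) =====
-- def _prioritize_files_for_documentation(files: list) -> dict:
--     """Categorize files by importance for intelligent processing."""
--     critical = []    # >100 changes - highest detail
--     important = []   # 20-100 changes - medium detail
--     moderate = []    # 5-20 changes - basic detail
--     minor = []       # <5 changes - minimal detail
--
--     for file_info in files:
--         total = file_info['total_changes']
--         if total > 100:
--             critical.append(file_info)
--         elif total >= 20:
--             important.append(file_info)
--         elif total >= 5:
--             moderate.append(file_info)
--         else: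
--             minor.append(file_info)
--
--     return {
--         'critical': critical,
--         'important': important,
--         'moderate': moderate,
--         'minor': minor
--     }
-- ===== SOURCE B (Python) =====
-- def _prioritize_files_for_documentation(files: list) -> dict:
--     """Categorize files by importance for intelligent processing."""
--     return {
--         'critical': [f for f in files if f['total_changes'] > 100],
--         'important': [f for f in files if 20 <= f['total_changes'] <= 100],
--         'moderate': [f for f in files if 5 <= f['total_changes'] < 20],
--         'minor': [f for f in files if f['total_changes'] < 5],
--     }
-- ===== Notes on version B (the rewrite author's own statement) =====
-- stated objective: simpler
-- what changed: Replaces the single bucketing pass with four accumulator lists and an if/elif ladder by four independent filter comprehensions, one per category with an explicit disjoint range; correct because the ranges partition the integers and each filter preserves input order.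
import Mathlib
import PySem

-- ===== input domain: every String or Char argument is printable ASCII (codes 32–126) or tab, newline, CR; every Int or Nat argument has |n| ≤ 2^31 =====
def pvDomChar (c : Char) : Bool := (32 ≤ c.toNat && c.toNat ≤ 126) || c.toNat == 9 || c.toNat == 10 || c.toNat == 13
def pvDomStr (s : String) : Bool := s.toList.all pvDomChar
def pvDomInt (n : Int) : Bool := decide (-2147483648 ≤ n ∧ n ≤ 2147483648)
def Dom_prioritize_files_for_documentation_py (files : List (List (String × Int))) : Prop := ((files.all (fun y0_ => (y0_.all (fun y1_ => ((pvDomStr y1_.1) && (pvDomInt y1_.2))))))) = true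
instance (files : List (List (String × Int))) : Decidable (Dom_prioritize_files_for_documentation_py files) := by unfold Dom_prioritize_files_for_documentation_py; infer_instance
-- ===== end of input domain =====

-- B replaces A's single bucketing pass (if/elif ladder into four accumulator lists) with four
-- independent filter passes over disjoint ranges; objective: simpler.


-- ===== PORT A =====
-- file_info['total_changes'] (first-match dict lookup); under Pre_ the key is present,
-- so getD's default is never used
def pvTotalA (fi : List (String × Int)) : Int :=
  (PySem.Dict.mk fi).getD "total_changes" 0

def pvStepA (s : List (List (String × Int)) × List (List (String × Int)) × List (List (String × Int)) × List (List (String × Int)))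
    (fi : List (String × Int)) :
    List (List (String × Int)) × List (List (String × Int)) × List (List (String × Int)) × List (List (String × Int)) :=
  let total := pvTotalA fi
  if total > 100 then (s.1 ++ [fi], s.2.1, s.2.2.1, s.2.2.2)
  else if total ≥ 20 then (s.1, s.2.1 ++ [fi], s.2.2.1, s.2.2.2)
  else if total ≥ 5 then (s.1, s.2.1, s.2.2.1 ++ [fi], s.2.2.2)
  else (s.1, s.2.1, s.2.2.1, s.2.2.2 ++ [fi])

def prioritize_files_for_documentation_py (files : List (List (String × Int))) : List (String × List (List (String × Int))) :=
  let s := files.foldl pvStepA ([], [], [], [])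
  [("critical", s.1), ("important", s.2.1), ("moderate", s.2.2.1), ("minor", s.2.2.2)]

-- ===== PORT B =====
-- B's own lookup of file_info['total_changes'] (same Python expression in Source B's comprehensions)
def pvTotalB (fi : List (String × Int)) : Int :=
  (PySem.Dict.mk fi).getD "total_changes" 0

def prioritize_files_for_documentation_py_alt (files : List (List (String × Int))) : List (String × List (List (String × Int))) :=
  [("critical", files.filter (fun f => 100 < pvTotalB f)),
   ("important", files.filter (fun f => 20 ≤ pvTotalB f && pvTotalB f ≤ 100)),
   ("moderate", files.filter (fun f => 5 ≤ pvTotalB f && pvTotalB f < 20)),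
   ("minor", files.filter (fun f => pvTotalB f < 5))]

-- ===== PRECONDITION & SPEC =====
-- Pre_ excludes exactly the inputs on which A raises KeyError: a file dict without the
-- 'total_changes' key (B raises there too).
def Pre_prioritize_files_for_documentation_py (files : List (List (String × Int))) : Prop :=
  (files.all (fun fi => (fi.map Prod.fst).contains "total_changes")) = true
instance (files : List (List (String × Int))) : Decidable (Pre_prioritize_files_for_documentation_py files) := by unfold Pre_prioritize_files_for_documentation_py; infer_instance

def pvWitness_prioritize_files_for_documentation_py : (List (List (String × Int))) :=
  [[("total_changes", 7)], [("total_changes", 150), ("adds", 3)]]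

def Spec_prioritize_files_for_documentation_py (files : List (List (String × Int))) (out : List (String × List (List (String × Int)))) : Prop := out = prioritize_files_for_documentation_py_alt files
instance (files : List (List (String × Int))) (out : List (String × List (List (String × Int)))) : Decidable (Spec_prioritize_files_for_documentation_py files out) := by unfold Spec_prioritize_files_for_documentation_py; infer_instance

-- ===== CLAIM (what is proved, stated in full; the proofs are below) =====
def Claim_equal_prioritize_files_for_documentation_py : Prop := ∀ (files : List (List (String × Int))), Dom_prioritize_files_for_documentation_py files → Pre_prioritize_files_for_documentation_py files → Spec_prioritize_files_for_documentation_py files (prioritize_files_for_documentation_py files)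

-- ===== LEMMAS AND PROOFS =====
theorem pvStepA_1 (s : List (List (String × Int)) × List (List (String × Int)) × List (List (String × Int)) × List (List (String × Int))) (fi : List (String × Int)) :
    (pvStepA s fi).1 = if 100 < pvTotalA fi then s.1 ++ [fi] else s.1 := by
  simp only [pvStepA]; split_ifs <;> rfl

theorem pvStepA_2 (s : List (List (String × Int)) × List (List (String × Int)) × List (List (String × Int)) × List (List (String × Int))) (fi : List (String × Int)) :
    (pvStepA s fi).2.1 = if ¬ 100 < pvTotalA fi ∧ 20 ≤ pvTotalA fi then s.2.1 ++ [fi] else s.2.1 := by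
  simp only [pvStepA]; split_ifs <;> first | rfl | (exfalso; omega)

theorem pvStepA_3 (s : List (List (String × Int)) × List (List (String × Int)) × List (List (String × Int)) × List (List (String × Int))) (fi : List (String × Int)) :
    (pvStepA s fi).2.2.1 = if ¬ 20 ≤ pvTotalA fi ∧ 5 ≤ pvTotalA fi then s.2.2.1 ++ [fi] else s.2.2.1 := by
  simp only [pvStepA]; split_ifs <;> first | rfl | (exfalso; omega)

theorem pvStepA_4 (s : List (List (String × Int)) × List (List (String × Int)) × List (List (String × Int)) × List (List (String × Int))) (fi : List (String × Int)) :
    (pvStepA s fi).2.2.2 = if pvTotalA fi < 5 then s.2.2.2 ++ [fi] else s.2.2.2 := by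
  simp only [pvStepA]; split_ifs <;> first | rfl | (exfalso; omega)

theorem pv_comp1 (files : List (List (String × Int)))
    (s : List (List (String × Int)) × List (List (String × Int)) × List (List (String × Int)) × List (List (String × Int))) :
    (files.foldl pvStepA s).1 = s.1 ++ files.filter (fun f => 100 < pvTotalB f) := by
  induction files generalizing s with
  | nil => simp
  | cons fi rest ih =>
    rw [List.foldl_cons, ih, pvStepA_1, List.filter_cons]
    have hT : pvTotalB fi = pvTotalA fi := rfl
    by_cases h : 100 < pvTotalA fi
    · simp [h, hT]
    · simp [h, hT]

theorem pv_comp2 (files : List (List (String × Int)))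
    (s : List (List (String × Int)) × List (List (String × Int)) × List (List (String × Int)) × List (List (String × Int))) :
    (files.foldl pvStepA s).2.1 = s.2.1 ++ files.filter (fun f => 20 ≤ pvTotalB f && pvTotalB f ≤ 100) := by
  induction files generalizing s with
  | nil => simp
  | cons fi rest ih =>
    rw [List.foldl_cons, ih, pvStepA_2, List.filter_cons]
    have hT : pvTotalB fi = pvTotalA fi := rfl
    by_cases h : ¬ 100 < pvTotalA fi ∧ 20 ≤ pvTotalA fi
    · rw [if_pos h]
      have hc : (20 ≤ pvTotalB fi && pvTotalB fi ≤ 100) = true := by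
        simp [hT]; omega
      simp [hc]
    · rw [if_neg h]
      have hc : (20 ≤ pvTotalB fi && pvTotalB fi ≤ 100) = false := by
        simp [hT]; omega
      simp [hc]

theorem pv_comp3 (files : List (List (String × Int)))
    (s : List (List (String × Int)) × List (List (String × Int)) × List (List (String × Int)) × List (List (String × Int))) :
    (files.foldl pvStepA s).2.2.1 = s.2.2.1 ++ files.filter (fun f => 5 ≤ pvTotalB f && pvTotalB f < 20) := by
  induction files generalizing s with
  | nil => simp
  | cons fi rest ih =>
    rw [List.foldl_cons, ih, pvStepA_3, List.filter_cons]
    have hT : pvTotalB fi = pvTotalA fi := rfl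
    by_cases h : ¬ 20 ≤ pvTotalA fi ∧ 5 ≤ pvTotalA fi
    · rw [if_pos h]
      have hc : (5 ≤ pvTotalB fi && pvTotalB fi < 20) = true := by
        simp [hT]; omega
      simp [hc]
    · rw [if_neg h]
      have hc : (5 ≤ pvTotalB fi && pvTotalB fi < 20) = false := by
        simp [hT]; omega
      simp [hc]

theorem pv_comp4 (files : List (List (String × Int)))
    (s : List (List (String × Int)) × List (List (String × Int)) × List (List (String × Int)) × List (List (String × Int))) :
    (files.foldl pvStepA s).2.2.2 = s.2.2.2 ++ files.filter (fun f => pvTotalB f < 5) := by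
  induction files generalizing s with
  | nil => simp
  | cons fi rest ih =>
    rw [List.foldl_cons, ih, pvStepA_4, List.filter_cons]
    have hT : pvTotalB fi = pvTotalA fi := rfl
    by_cases h : pvTotalA fi < 5
    · simp [h, hT]
    · simp [h, hT]

-- ===== VERDICT (by name: the statement is the Claim_ definition above) =====
theorem prioritize_files_for_documentation_py_spec : Claim_equal_prioritize_files_for_documentation_py := by
  intro files _ _
  unfold Spec_prioritize_files_for_documentation_py
  unfold prioritize_files_for_documentation_py prioritize_files_for_documentation_py_alt
  simp only [pv_comp1, pv_comp2, pv_comp3, pv_comp4, List.nil_append]
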